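-- pv_equiv track=rewrite | github.com/HackBulgaria/Python-101-Forever | C01-Python-Basics/12-C01P01/Solution01/solution.py | iban_formatter
-- ===== SOURCE A (Python) =====
-- def iban_formatter(iban):
--     result = []
--     counter = 1
--
--     for character in iban:
--         if character == ' ':
--             continue
--
--         result.append(character)
--
--         if counter == 4:
--             result.append(' ')
--
--             counter = 0
--
--         counter += 1
--
--     return "".join(result)
-- ===== SOURCE B (Python) =====
-- def iban_formatter(iban):
--     cleaned = iban.replace(' ', '')
--     parts = []
--     while len(cleaned) >= 4:
--         parts.append(cleaned[:4] + ' ')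
--         cleaned = cleaned[4:]
--     parts.append(cleaned)
--     return ''.join(parts)
-- ===== Notes on version B (the rewrite author's own statement) =====
-- stated objective: simpler
-- what changed: B strips all spaces first with str.replace and then peels complete four-character groups off the front by slicing in a while loop, instead of A's single character-by-character pass with a wrap-around counter.
import Mathlib
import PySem

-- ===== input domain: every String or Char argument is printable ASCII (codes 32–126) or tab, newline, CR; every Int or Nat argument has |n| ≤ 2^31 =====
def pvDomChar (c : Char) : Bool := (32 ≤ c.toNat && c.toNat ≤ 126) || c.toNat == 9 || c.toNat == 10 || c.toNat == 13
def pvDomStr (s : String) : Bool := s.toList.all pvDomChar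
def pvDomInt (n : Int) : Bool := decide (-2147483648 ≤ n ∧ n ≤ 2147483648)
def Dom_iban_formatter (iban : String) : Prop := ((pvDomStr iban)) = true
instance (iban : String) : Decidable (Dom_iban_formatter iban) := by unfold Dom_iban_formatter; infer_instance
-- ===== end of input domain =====

-- B strips the spaces first (replace) and then peels complete four-character groups
-- off the front by slicing, instead of A's single pass with a wrap-around counter;
-- objective: simpler/idiomatic, same behaviour.

-- ===== PORT A =====
-- A's loop: skip ' ', append the char, after every 4th kept char append ' ' (counter wraps to 1).
def ibanLoopA : List Char → List Char → Int → List Char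
  | [], res, _ => res
  | c :: rest, res, counter =>
    if c = ' ' then ibanLoopA rest res counter
    else
      let res' := res ++ [c]
      if counter = 4 then ibanLoopA rest (res' ++ [' ']) (0 + 1)
      else ibanLoopA rest res' (counter + 1)

def iban_formatter (iban : String) : String :=
  String.ofList (ibanLoopA iban.toList [] 1)

-- ===== PORT B =====
-- B's while loop: while len(cleaned) >= 4, emit cleaned[:4] + ' ' and drop 4; then the remainder.
def ibanLoopB (l : List Char) : List Char :=
  if 4 ≤ l.length then l.take 4 ++ [' '] ++ ibanLoopB (l.drop 4)
  else l
termination_by l.length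
decreasing_by simp; omega

def iban_formatter_alt (iban : String) : String :=
  String.ofList (ibanLoopB (PySem.Str.replace iban " " "").toList)

-- ===== PRECONDITION & SPEC =====
def Spec_iban_formatter (iban : String) (out : String) : Prop := out = iban_formatter_alt iban
instance (iban : String) (out : String) : Decidable (Spec_iban_formatter iban out) := by unfold Spec_iban_formatter; infer_instance

-- ===== CLAIM (what is proved, stated in full; the proofs are below) =====
def Claim_equal_iban_formatter : Prop := ∀ (iban : String), Dom_iban_formatter iban → Spec_iban_formatter iban (iban_formatter iban)

-- ===== LEMMAS AND PROOFS =====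

-- replace s " " "" is exactly the space filter
theorem replace_go_space (fuel : Nat) (l acc : List Char) (h : l.length ≤ fuel) :
    PySem.Chars.replace.go [' '] [] fuel l acc = acc.reverse ++ l.filter (· ≠ ' ') := by
  induction fuel generalizing l acc with
  | zero =>
    interval_cases hl : l.length
    · simp [List.length_eq_zero_iff] at hl; subst hl
      simp [PySem.Chars.replace.go]
  | succ n ih =>
    cases l with
    | nil => simp [PySem.Chars.replace.go]
    | cons c t =>
      simp only [PySem.Chars.replace.go]
      by_cases hc : c = ' '
      · subst hc
        have : List.isPrefixOf [' '] (' ' :: t) = true := by simp [List.isPrefixOf]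
        rw [if_pos this]
        simp only [List.length_cons] at h
        simp only [show ([' '] : List Char).length = 1 from rfl, List.drop_succ_cons,
          List.drop_zero, List.reverse_nil, List.nil_append]
        rw [ih t acc (by omega)]
        simp
      · have : List.isPrefixOf [' '] (c :: t) = false := by
          simp [List.isPrefixOf]; exact fun hh => hc hh.symm
        rw [if_neg (by simp [this])]
        simp only [List.length_cons] at h
        rw [ih t (c :: acc) (by omega)]
        simp [hc]

theorem replace_space_eq_filter (s : List Char) :
    PySem.Chars.replace s [' '] [] = s.filter (· ≠ ' ') := by
  unfold PySem.Chars.replace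
  simp [replace_go_space s.length s []]

-- A's loop ignores the spaces of its input entirely
theorem loopA_filter (l : List Char) : ∀ res counter,
    ibanLoopA l res counter = ibanLoopA (l.filter (· ≠ ' ')) res counter := by
  induction l with
  | nil => intro res counter; rfl
  | cons c t ih =>
    intro res counter
    by_cases hc : c = ' '
    · subst hc; simp [ibanLoopA, ih]
    · simp [ibanLoopA, hc, ih]

-- on a space-free list, A's counter loop (started at 1) produces exactly B's chunked output
theorem loopA_eq_loopB (n : Nat) : ∀ (l : List Char), l.length ≤ n →
    (∀ c ∈ l, c ≠ ' ') → ∀ (res : List Char),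
    ibanLoopA l res 1 = res ++ ibanLoopB l := by
  induction n with
  | zero =>
    intro l hl _ res
    have : l = [] := by simpa [List.length_eq_zero_iff] using Nat.le_zero.mp hl
    subst this
    simp [ibanLoopA, ibanLoopB]
  | succ n ih =>
    intro l hl hsp res
    match l with
    | [] => simp [ibanLoopA, ibanLoopB]
    | [a] =>
      have ha : ¬ a = ' ' := hsp a (by simp)
      simp [ibanLoopA, ibanLoopB, ha]
    | [a, b] =>
      have ha : ¬ a = ' ' := hsp a (by simp)
      have hb : ¬ b = ' ' := hsp b (by simp)
      simp [ibanLoopA, ibanLoopB, ha, hb]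
    | [a, b, c] =>
      have ha : ¬ a = ' ' := hsp a (by simp)
      have hb : ¬ b = ' ' := hsp b (by simp)
      have hc : ¬ c = ' ' := hsp c (by simp)
      simp [ibanLoopA, ibanLoopB, ha, hb, hc]
    | a :: b :: c :: d :: rest =>
      have ha : ¬ a = ' ' := hsp a (by simp)
      have hb : ¬ b = ' ' := hsp b (by simp)
      have hc : ¬ c = ' ' := hsp c (by simp)
      have hd : ¬ d = ' ' := hsp d (by simp)
      have hrest : ∀ x ∈ rest, x ≠ ' ' := fun x hx => hsp x (by simp [hx])
      have hlen : rest.length ≤ n := by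
        simp only [List.length_cons] at hl; omega
      rw [show ibanLoopB (a :: b :: c :: d :: rest)
            = a :: b :: c :: d :: ' ' :: ibanLoopB rest by
        rw [ibanLoopB]; simp]
      simp only [ibanLoopA, if_neg ha, if_neg hb, if_neg hc, if_neg hd]
      norm_num
      rw [ih rest hlen hrest]
      simp

-- ===== VERDICT (by name: the statement is the Claim_ definition above) =====
theorem iban_formatter_spec : Claim_equal_iban_formatter := by
  intro iban _
  unfold Spec_iban_formatter iban_formatter iban_formatter_alt
  rw [loopA_filter, PySem.Str.toList_replace]
  have : (" " : String).toList = [' '] := rfl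
  rw [this, show ("" : String).toList = [] from rfl, replace_space_eq_filter]
  rw [loopA_eq_loopB (iban.toList.filter (· ≠ ' ')).length _ le_rfl
    (by intro c hc; simpa using (List.mem_filter.mp hc).2) []]
  simp
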